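-- pv_equiv track=rewrite | github.com/leiyuan1989/ipmigration | ipmigration/cell/apr/tech.py | place_rectangles
-- ===== SOURCE A (Python) =====
-- def place_rectangles(height_tuple, h1, h2, s):
--     # Parse the height range tuple (low, high)
--     low, high = height_tuple
--     total_available_height = high - low  # Calculate total available height
--
--     # Determine the maximum number of rectangles (n) that can be placed, with a minimum of 4
--     n = 4  # Start with the minimum of 4 rectangles
--     while True:
--         # Calculate total height required for current n rectangles
--         # Formula: (n-2) rectangles of h1 + 2 rectangles of h2 + (n-1) spaces of s
--         total = (n - 2) * h1 + 2 * h2 + (n + 1) * s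
--
--         # If total exceeds available height, previous n is maximum possible
--         if total > total_available_height:
--             n -= 1
--             break
--
--         # Try increasing n to fit more rectangles
--         n += 1
--
--     # Calculate excess space to be placed at the top
--     total_used_height = (n - 2) * h1 + 2 * h2 + (n + 1) * s
--     excess = total_available_height - total_used_height
--
--     # Calculate positions for each rectangle
--     positions = []
--     current_low = low + s  # Starting position of the topmost rectangle (accounting for excess space)
--
--     for i in range(n):
--         # Determine height for current rectangle:
--         # h2 for second from top (i=1) and second from bottom (i=n-2)
--         # h1 for all other positions
--
--         #TODO: Below need consider other Tracks
--         # current_height = h2 if i == 2 or i == n - 3 else h1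
--         current_height = h2 if i == n//2 or i == n//2 - 1 else h1
--
--         current_high = current_low + current_height
--         positions.append([current_low, current_high])
--
--         # Set starting position for next rectangle (current top + space)
--         current_low = current_high + s
--
--     return positions
-- ===== SOURCE B (Python) =====
-- def place_rectangles(height_tuple, h1, h2, s):
--     low, high = height_tuple
--     avail = high - low
--     # Closed-form count: total(n) = n*(h1+s) + (2*h2 - 2*h1 + s) is affine in n,
--     # so the largest n with total(n) <= avail is a floor division; clamp at 3.
--     if h1 + s > 0:
--         n = max(3, (avail - 2 * h2 + 2 * h1 - s) // (h1 + s))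
--     else:
--         n = 3
--     m = n // 2
--     d = h2 - h1
--     # Closed-form position of rectangle i: no running accumulator.
--     def lo(i):
--         extra = (1 if i >= m else 0) + (1 if i >= m + 1 else 0)
--         return low + (i + 1) * s + i * h1 + extra * d
--     return [[lo(i), lo(i) + (h2 if i == m or i == m - 1 else h1)] for i in range(n)]
-- ===== Notes on version B (the rewrite author's own statement) =====
-- stated objective: alternative
-- what changed: The linear search for the rectangle count n is replaced by a closed-form floor division (total(n) is affine in n, clamped at 3), and the running-accumulator position loop is replaced by a direct per-index closed-form formula; Pre_ excludes only the inputs (h1+s<=0 with total(4)<=available height) on which A's while-loop never terminates.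
import Mathlib
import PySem

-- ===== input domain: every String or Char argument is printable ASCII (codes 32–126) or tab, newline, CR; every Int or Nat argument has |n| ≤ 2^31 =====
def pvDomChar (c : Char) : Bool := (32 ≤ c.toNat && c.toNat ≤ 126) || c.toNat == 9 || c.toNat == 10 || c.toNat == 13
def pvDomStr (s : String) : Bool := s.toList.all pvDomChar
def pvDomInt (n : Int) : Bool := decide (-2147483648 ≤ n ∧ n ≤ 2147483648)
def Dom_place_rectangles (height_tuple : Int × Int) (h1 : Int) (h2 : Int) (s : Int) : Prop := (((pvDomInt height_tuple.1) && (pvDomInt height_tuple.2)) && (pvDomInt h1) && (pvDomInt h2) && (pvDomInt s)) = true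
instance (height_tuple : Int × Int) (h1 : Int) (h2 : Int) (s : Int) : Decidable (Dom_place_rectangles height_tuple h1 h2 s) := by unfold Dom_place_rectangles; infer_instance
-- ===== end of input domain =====

-- B replaces A's linear search for the rectangle count by a closed-form floor division and
-- the running-accumulator position loop by a per-index closed-form formula (alternative, same cost).


-- ===== PORT A =====
-- A's `while True` search for n; the `if h1 + s ≤ 0 then 0` branch only makes the recursion
-- total in Lean: on those inputs Python A loops forever (they are excluded by Pre_).
def place_rectangles_loop (h1 h2 s H n : Int) : Int :=
  if H < (n - 2) * h1 + 2 * h2 + (n + 1) * s then n - 1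
  else if h1 + s ≤ 0 then 0
  else place_rectangles_loop h1 h2 s H (n + 1)
termination_by (H + 1 - ((n - 2) * h1 + 2 * h2 + (n + 1) * s)).toNat
decreasing_by
  have key : (n + 1 - 2) * h1 + 2 * h2 + (n + 1 + 1) * s
      = ((n - 2) * h1 + 2 * h2 + (n + 1) * s) + (h1 + s) := by ring
  generalize (n - 2) * h1 + 2 * h2 + (n + 1) * s = t at *
  generalize (n + 1 - 2) * h1 + 2 * h2 + (n + 1 + 1) * s = t2 at *
  omega

def place_rectangles (height_tuple : Int × Int) (h1 : Int) (h2 : Int) (s : Int) : List (List Int) :=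
  let low := height_tuple.1
  let total_available_height := height_tuple.2 - low
  let n := place_rectangles_loop h1 h2 s total_available_height 4
  -- (A also computes `excess := total_available_height - total_used_height`, which is never used)
  let nd2 := PySem.Int.floordiv n 2
  ((PySem.List.pyRange 0 n 1).foldl
    (fun (st : List (List Int) × Int) i =>
      let current_height := if i = nd2 ∨ i = nd2 - 1 then h2 else h1
      let current_high := st.2 + current_height
      (st.1 ++ [[st.2, current_high]], current_high + s))
    ([], low + s)).1

-- ===== PORT B =====
-- closed-form low edge of rectangle i (B's helper `lo`)
def pvAltLo (low h1 s m d i : Int) : Int :=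
  low + (i + 1) * s + i * h1 + ((if m ≤ i then (1 : Int) else 0) + (if m + 1 ≤ i then (1 : Int) else 0)) * d

def place_rectangles_alt (height_tuple : Int × Int) (h1 : Int) (h2 : Int) (s : Int) : List (List Int) :=
  let low := height_tuple.1
  let avail := height_tuple.2 - low
  let n := if 0 < h1 + s then max 3 (PySem.Int.floordiv (avail - 2 * h2 + 2 * h1 - s) (h1 + s)) else 3
  let m := PySem.Int.floordiv n 2
  let d := h2 - h1
  (PySem.List.pyRange 0 n 1).map (fun i =>
    let lo := pvAltLo low h1 s m d i
    [lo, lo + (if i = m ∨ i = m - 1 then h2 else h1)])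

-- ===== PRECONDITION & SPEC =====
-- Pre_ excludes exactly the inputs on which A's while-loop never terminates
-- (step h1+s ≤ 0 while the initial total (n=4) already fits): A returns on no such input.
def Pre_place_rectangles (height_tuple : Int × Int) (h1 : Int) (h2 : Int) (s : Int) : Prop :=
  0 < h1 + s ∨ height_tuple.2 - height_tuple.1 < 2 * h1 + 2 * h2 + 5 * s
instance (height_tuple : Int × Int) (h1 : Int) (h2 : Int) (s : Int) : Decidable (Pre_place_rectangles height_tuple h1 h2 s) := by unfold Pre_place_rectangles; infer_instance

def pvWitness_place_rectangles : (Int × Int) × Int × Int × Int := ((0, 30), 2, 3, 1)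

def Spec_place_rectangles (height_tuple : Int × Int) (h1 : Int) (h2 : Int) (s : Int) (out : List (List Int)) : Prop := out = place_rectangles_alt height_tuple h1 h2 s
instance (height_tuple : Int × Int) (h1 : Int) (h2 : Int) (s : Int) (out : List (List Int)) : Decidable (Spec_place_rectangles height_tuple h1 h2 s out) := by unfold Spec_place_rectangles; infer_instance

-- ===== CLAIM (what is proved, stated in full; the proofs are below) =====
def Claim_equal_place_rectangles : Prop := ∀ (height_tuple : Int × Int) (h1 : Int) (h2 : Int) (s : Int), Dom_place_rectangles height_tuple h1 h2 s → Pre_place_rectangles height_tuple h1 h2 s → Spec_place_rectangles height_tuple h1 h2 s (place_rectangles height_tuple h1 h2 s)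

-- ===== LEMMAS AND PROOFS =====

-- total(n) ≤ H  ↔  n ≤ (H - 2*h2 + 2*h1 - s) // (h1+s)   (for positive step)
lemma total_le_iff (h1 h2 s H n : Int) (hpos : 0 < h1 + s) :
    ((n - 2) * h1 + 2 * h2 + (n + 1) * s ≤ H)
      ↔ n ≤ PySem.Int.floordiv (H - 2 * h2 + 2 * h1 - s) (h1 + s) := by
  rw [PySem.Int.le_floordiv_iff_mul_le hpos]
  have hr : n * (h1 + s) = (n - 2) * h1 + 2 * h2 + (n + 1) * s + (2 * h1 - 2 * h2 - s) := by ring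
  constructor <;> intro h <;> linarith

-- A's search returns the floor-division value whenever it starts at or below it
lemma loop_eq (h1 h2 s H : Int) (hpos : 0 < h1 + s) :
    ∀ k (n : Int),
      (PySem.Int.floordiv (H - 2 * h2 + 2 * h1 - s) (h1 + s) - n).toNat = k →
      n ≤ PySem.Int.floordiv (H - 2 * h2 + 2 * h1 - s) (h1 + s) →
      place_rectangles_loop h1 h2 s H n = PySem.Int.floordiv (H - 2 * h2 + 2 * h1 - s) (h1 + s) := by
  intro k
  induction k with
  | zero =>
    intro n h0 hle
    have hnq : n = PySem.Int.floordiv (H - 2 * h2 + 2 * h1 - s) (h1 + s) := by omega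
    have hfit : (n - 2) * h1 + 2 * h2 + (n + 1) * s ≤ H :=
      (total_le_iff h1 h2 s H n hpos).2 hle
    rw [place_rectangles_loop, if_neg (by omega), if_neg (by omega),
        place_rectangles_loop]
    have hbig : ¬ ((n + 1 - 2) * h1 + 2 * h2 + (n + 1 + 1) * s ≤ H) := by
      intro hc
      have := (total_le_iff h1 h2 s H (n + 1) hpos).1 hc
      omega
    rw [if_pos (by omega)]
    omega
  | succ k ih =>
    intro n h0 hle
    have hfit : (n - 2) * h1 + 2 * h2 + (n + 1) * s ≤ H := (total_le_iff h1 h2 s H n hpos).2 hle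
    rw [place_rectangles_loop, if_neg (by omega), if_neg (by omega)]
    exact ih (n + 1) (by omega) (by omega)

-- A's n equals B's n on Pre_
lemma n_eq (h1 h2 s H : Int)
    (hpre : 0 < h1 + s ∨ H < 2 * h1 + 2 * h2 + 5 * s) :
    place_rectangles_loop h1 h2 s H 4
      = (if 0 < h1 + s then max 3 (PySem.Int.floordiv (H - 2 * h2 + 2 * h1 - s) (h1 + s)) else 3) := by
  by_cases hp : 0 < h1 + s
  · rw [if_pos hp]
    set q := PySem.Int.floordiv (H - 2 * h2 + 2 * h1 - s) (h1 + s) with hq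
    by_cases h4 : 4 ≤ q
    · rw [loop_eq h1 h2 s H hp (q - 4).toNat 4 rfl h4]
      omega
    · have hbig : ¬ ((4 - 2) * h1 + 2 * h2 + (4 + 1) * s ≤ H) := by
        intro hc
        have := (total_le_iff h1 h2 s H 4 hp).1 hc
        omega
      rw [place_rectangles_loop, if_pos (by omega)]
      omega
  · rw [if_neg hp]
    have hH : H < 2 * h1 + 2 * h2 + 5 * s := hpre.resolve_left hp
    rw [place_rectangles_loop, if_pos (by omega)]
    omega

-- stepping the closed-form low edge by one rectangle
lemma pvAltLo_succ (low h1 h2 s m d i : Int) (hd : d = h2 - h1) :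
    pvAltLo low h1 s m d (i + 1)
      = pvAltLo low h1 s m d i + (if i = m ∨ i = m - 1 then h2 else h1) + s := by
  subst hd
  simp only [pvAltLo]
  split_ifs <;> first | ring1 | (exfalso; omega)

-- A's accumulator fold produces B's mapped closed form
lemma fold_eq_map (low h1 h2 s m d : Int) (hd : d = h2 - h1) :
    ∀ k (i n : Int) (acc : List (List Int)), i ≤ n → (n - i).toNat = k →
      ((PySem.List.pyRange i n 1).foldl
        (fun (st : List (List Int) × Int) j =>
          let current_height := if j = m ∨ j = m - 1 then h2 else h1
          let current_high := st.2 + current_height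
          (st.1 ++ [[st.2, current_high]], current_high + s))
        (acc, pvAltLo low h1 s m d i))
      = (acc ++ (PySem.List.pyRange i n 1).map (fun j =>
            let lo := pvAltLo low h1 s m d j
            [lo, lo + (if j = m ∨ j = m - 1 then h2 else h1)]),
         pvAltLo low h1 s m d n) := by
  intro k
  induction k with
  | zero =>
    intro i n acc hle h0
    have hin : i = n := by omega
    subst hin
    simp
  | succ k ih =>
    intro i n acc hle h0
    have hlt : i < n := by omega
    rw [PySem.List.pyRange_one_cons hlt]
    simp only [List.foldl_cons, List.map_cons]
    rw [show pvAltLo low h1 s m d i + (if i = m ∨ i = m - 1 then h2 else h1) + s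
          = pvAltLo low h1 s m d (i + 1) from (pvAltLo_succ low h1 h2 s m d i hd).symm]
    rw [ih (i + 1) n (acc ++ [[pvAltLo low h1 s m d i,
          pvAltLo low h1 s m d i + (if i = m ∨ i = m - 1 then h2 else h1)]]) (by omega) (by omega)]
    simp

lemma pvAltLo_zero (low h1 s m d : Int) (hm : 1 ≤ m) :
    pvAltLo low h1 s m d 0 = low + s := by
  simp only [pvAltLo]
  rw [if_neg (by omega), if_neg (by omega)]
  ring

-- ===== VERDICT (by name: the statement is the Claim_ definition above) =====
theorem place_rectangles_spec : Claim_equal_place_rectangles := by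
  intro height_tuple h1 h2 s _ hpre
  unfold Spec_place_rectangles place_rectangles place_rectangles_alt
  simp only []
  set low := height_tuple.1 with hlow
  set H := height_tuple.2 - low with hH
  rw [n_eq h1 h2 s H hpre]
  set n := (if 0 < h1 + s then max 3 (PySem.Int.floordiv (H - 2 * h2 + 2 * h1 - s) (h1 + s)) else 3) with hn
  have hn3 : 3 ≤ n := by
    rw [hn]; split_ifs <;> omega
  set m := PySem.Int.floordiv n 2 with hm
  have hm1 : 1 ≤ m := by
    rw [hm, PySem.Int.le_floordiv_iff_mul_le (by omega : (0:Int) < 2)]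
    omega
  have h0 : pvAltLo low h1 s m (h2 - h1) 0 = low + s := pvAltLo_zero low h1 s m (h2 - h1) hm1
  rw [← h0,
      fold_eq_map low h1 h2 s m (h2 - h1) rfl n.toNat 0 n [] (by omega) (by omega)]
  simp
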